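-- pv_equiv track=rewrite | github.com/melrefaiy2018/publication-scripts | 2025/IsiA_paper/pymembrane/pymembrane/pymembrane/util/mcce_neededFiles/rename_non_standard_2_standard.py | remap_cla_names
-- ===== SOURCE A (Python) =====
-- from collections import defaultdict
-- from copy import deepcopy
--
-- def remap_cla_names(data, reverse_mapping, on_collision="keep-both"):
--     out = deepcopy(data)
--
--     # 1) Map names (default to original if not found)
--     mapped = [reverse_mapping.get(a, a) for a in data["atom"]]
--
--     # 2) Handle collisions
--     name_positions = defaultdict(list)
--     for i, name in enumerate(mapped):
--         name_positions[name].append(i)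
--     duplicates = {k: v for k, v in name_positions.items() if len(v) > 1}
--
--     if on_collision == "enumerate":
--         seen = defaultdict(int)
--         mapped_new = []
--         for name in mapped:
--             seen[name] += 1
--             mapped_new.append(name if seen[name] == 1 else f"{name}_{seen[name]}")
--         mapped = mapped_new
--
--     elif on_collision == "first-wins":
--         keep = set()
--         mask = []
--         for name in mapped:
--             if name not in keep:
--                 keep.add(name)
--                 mask.append(True)
--             else:
--                 mask.append(False)
--         mapped = [n for n, m in zip(mapped, mask) if m]
--         out["q_00"] = [v for v, m in zip(out["q_00"], mask) if m]
--         out["q_11"] = [v for v, m in zip(out["q_11"], mask) if m]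
--
--     out["atom"] = mapped
--     return out, duplicates
-- ===== SOURCE B (Python) =====
-- def remap_cla_names(data, reverse_mapping, on_collision="keep-both"):
--     out = dict(data)
--
--     # map names (default to original if not found)
--     mapped = [reverse_mapping.get(a, a) for a in data["atom"]]
--
--     # duplicates: names occurring more than once, in first-occurrence order,
--     # each with all of its positions (stateless prefix-count formulation)
--     dup_names = [n for i, n in enumerate(mapped)
--                  if mapped.count(n) > 1 and n not in mapped[:i]]
--     duplicates = {n: [i for i, m in enumerate(mapped) if m == n] for n in dup_names}
--
--     if on_collision == "enumerate":
--         out["atom"] = [n if (c := mapped[:i].count(n)) == 0 else f"{n}_{c + 1}"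
--                        for i, n in enumerate(mapped)]
--     elif on_collision == "first-wins":
--         keep = [i for i, n in enumerate(mapped) if n not in mapped[:i]]
--         out["atom"] = [n for i, n in enumerate(mapped) if i in keep]
--         out["q_00"] = [v for i, v in enumerate(out["q_00"]) if i in keep]
--         out["q_11"] = [v for i, v in enumerate(out["q_11"]) if i in keep]
--     else:
--         out["atom"] = mapped
--     return out, duplicates
-- ===== Notes on version B (the rewrite author's own statement) =====
-- stated objective: alternative
-- what changed: A's three streaming passes with mutable running state (a defaultdict of position lists, a seen-counter dict for 'enumerate', a seen-set plus boolean mask for 'first-wins') are replaced by stateless comprehensions: duplicates via a group-by-name dict comprehension over first occurrences, suffix numbering via the count of the name in the prefix mapped[:i], and 'first-wins' via the list of first-occurrence indices used as an index filter across atom/q_00/q_11.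
import Mathlib
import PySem

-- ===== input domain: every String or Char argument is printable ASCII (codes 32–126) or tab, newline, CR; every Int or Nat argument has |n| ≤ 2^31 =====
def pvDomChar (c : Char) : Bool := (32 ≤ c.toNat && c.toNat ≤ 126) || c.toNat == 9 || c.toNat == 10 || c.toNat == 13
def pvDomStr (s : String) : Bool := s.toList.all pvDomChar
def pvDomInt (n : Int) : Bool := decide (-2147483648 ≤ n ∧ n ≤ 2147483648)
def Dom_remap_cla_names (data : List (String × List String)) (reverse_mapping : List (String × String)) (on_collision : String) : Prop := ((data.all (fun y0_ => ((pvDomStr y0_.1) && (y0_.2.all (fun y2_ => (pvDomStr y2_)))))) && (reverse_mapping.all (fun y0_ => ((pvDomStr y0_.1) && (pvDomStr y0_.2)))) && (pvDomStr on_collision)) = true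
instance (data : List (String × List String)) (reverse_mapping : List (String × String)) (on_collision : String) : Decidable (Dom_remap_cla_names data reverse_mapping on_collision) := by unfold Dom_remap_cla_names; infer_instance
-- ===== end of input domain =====

-- B replaces A's streaming passes (running counter-dict, seen-set, mask) by stateless
-- comprehensions over prefix counts / prefix membership; equivalence is about the RETURN
-- value (A deep-copies its argument, neither version mutates the caller's dict).

-- ===== PORT A =====
def remap_cla_names (data : List (String × List String)) (reverse_mapping : List (String × String)) (on_collision : String) : (List (String × List String)) × (List (String × List Int)) :=
  let out := PySem.Dict.ofList data                     -- out = deepcopy(data)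
  let rmd := PySem.Dict.ofList reverse_mapping
  -- data["atom"] is present under Pre_; getD [] is exact there
  let mapped := (out.getD "atom" []).map (fun a => rmd.getD a a)
  let name_positions := (PySem.List.enumerate mapped).foldl
      (fun (np : PySem.Dict String (List Int)) p => np.modify p.2 [] (· ++ [p.1])) PySem.Dict.empty
  let duplicates := name_positions.items.filter (fun p => decide (p.2.length > 1))
  if on_collision == "enumerate" then
    let st := mapped.foldl
      (fun (st : PySem.Dict String Int × List String) name =>
        let seen := st.1.modify name 0 (· + 1)
        (seen, st.2 ++ [if seen.getD name 0 == 1 then name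
                        else name ++ "_" ++ PySem.Int.toStr (seen.getD name 0)]))
      (PySem.Dict.empty, [])
    ((out.insert "atom" st.2).items, duplicates)
  else if on_collision == "first-wins" then
    let km := mapped.foldl
      (fun (km : PySem.Set String × List Bool) name =>
        if !(km.1.contains name) then (PySem.Set.add km.1 name, km.2 ++ [true])
        else (km.1, km.2 ++ [false]))
      (PySem.Set.ofList [], [])
    let mapped' := ((mapped.zip km.2).filter (·.2)).map (·.1)
    let out := out.insert "q_00" ((((out.getD "q_00" []).zip km.2).filter (·.2)).map (·.1))
    let out := out.insert "q_11" ((((out.getD "q_11" []).zip km.2).filter (·.2)).map (·.1))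
    ((out.insert "atom" mapped').items, duplicates)
  else
    ((out.insert "atom" mapped).items, duplicates)

-- ===== PORT B =====
-- the comprehension bodies of Source B, as named helpers:
-- 'n if (c := mapped[:i].count(n)) == 0 else f"{n}_{c + 1}"'
def pvEnumName (m : List String) (p : Int × String) : String :=
  let c := (PySem.List.slice m none (some p.1)).count p.2
  if c == 0 then p.2 else p.2 ++ "_" ++ PySem.Int.toStr ((c : Int) + 1)

-- '[i for i, m in enumerate(mapped) if m == n]'
def pvPositions (m : List String) (n : String) : List Int :=
  ((PySem.List.enumerate m).filter (fun q => q.2 == n)).map (·.1)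

def remap_cla_names_alt (data : List (String × List String)) (reverse_mapping : List (String × String)) (on_collision : String) : (List (String × List String)) × (List (String × List Int)) :=
  let out := PySem.Dict.ofList data                     -- out = dict(data)
  let rmd := PySem.Dict.ofList reverse_mapping
  let mapped := (out.getD "atom" []).map (fun a => rmd.getD a a)
  let dup_names := ((PySem.List.enumerate mapped).filter
      (fun p => decide (mapped.count p.2 > 1)
                && !((PySem.List.slice mapped none (some p.1)).contains p.2))).map (·.2)
  let duplicates := dup_names.map (fun n => (n, pvPositions mapped n))
  if on_collision == "enumerate" then
    ((out.insert "atom" ((PySem.List.enumerate mapped).map (pvEnumName mapped))).items, duplicates)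
  else if on_collision == "first-wins" then
    let keep := ((PySem.List.enumerate mapped).filter
        (fun p => !((PySem.List.slice mapped none (some p.1)).contains p.2))).map (·.1)
    let atom' := ((PySem.List.enumerate mapped).filter (fun q => keep.contains q.1)).map (·.2)
    let out := out.insert "q_00"
        (((PySem.List.enumerate (out.getD "q_00" [])).filter (fun q => keep.contains q.1)).map (·.2))
    let out := out.insert "q_11"
        (((PySem.List.enumerate (out.getD "q_11" [])).filter (fun q => keep.contains q.1)).map (·.2))
    ((out.insert "atom" atom').items, duplicates)
  else
    ((out.insert "atom" mapped).items, duplicates)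

-- ===== PRECONDITION & SPEC =====
-- Pre_ excludes exactly the inputs on which the Python A raises KeyError:
-- data lacking the "atom" key, and, under "first-wins", lacking "q_00" or "q_11".
def Pre_remap_cla_names (data : List (String × List String)) (reverse_mapping : List (String × String)) (on_collision : String) : Prop :=
  "atom" ∈ data.map Prod.fst ∧
  (on_collision = "first-wins" → "q_00" ∈ data.map Prod.fst ∧ "q_11" ∈ data.map Prod.fst)
instance (data : List (String × List String)) (reverse_mapping : List (String × String)) (on_collision : String) : Decidable (Pre_remap_cla_names data reverse_mapping on_collision) := by unfold Pre_remap_cla_names; infer_instance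

def pvWitness_remap_cla_names : (List (String × List String)) × (List (String × String)) × String :=
  ([("atom", ["CA", "CA", "N"]), ("q_00", ["1", "2", "3"]), ("q_11", ["4", "5", "6"])],
   [("CA", "C")], "first-wins")

def Spec_remap_cla_names (data : List (String × List String)) (reverse_mapping : List (String × String)) (on_collision : String) (out : (List (String × List String)) × (List (String × List Int))) : Prop := out = remap_cla_names_alt data reverse_mapping on_collision
instance (data : List (String × List String)) (reverse_mapping : List (String × String)) (on_collision : String) (out : (List (String × List String)) × (List (String × List Int))) : Decidable (Spec_remap_cla_names data reverse_mapping on_collision out) := by unfold Spec_remap_cla_names; infer_instance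

-- ===== CLAIM (what is proved, stated in full; the proofs are below) =====
def Claim_equal_remap_cla_names : Prop := ∀ (data : List (String × List String)) (reverse_mapping : List (String × String)) (on_collision : String), Dom_remap_cla_names data reverse_mapping on_collision → Pre_remap_cla_names data reverse_mapping on_collision → Spec_remap_cla_names data reverse_mapping on_collision (remap_cla_names data reverse_mapping on_collision)

-- ===== LEMMAS AND PROOFS =====

theorem pv_witness_ok : Dom_remap_cla_names pvWitness_remap_cla_names.1 pvWitness_remap_cla_names.2.1 pvWitness_remap_cla_names.2.2 ∧ Pre_remap_cla_names pvWitness_remap_cla_names.1 pvWitness_remap_cla_names.2.1 pvWitness_remap_cla_names.2.2 := by decide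


-- proof-side helpers: first-occurrence structure of a list, relative to a prefix
def pvDedupAux (pre m : List String) : List String :=
  match m with
  | [] => []
  | n :: t => (if pre.contains n then [] else [n]) ++ pvDedupAux (pre ++ [n]) t

def pvFirstPairs (pre m : List String) : List (Int × String) :=
  match m with
  | [] => []
  | n :: t => (if pre.contains n then [] else [((pre.length : Int), n)]) ++ pvFirstPairs (pre ++ [n]) t

lemma pv_slice_pre {pre m : List String} :
    PySem.List.slice (pre ++ m) none (some ((pre.length : Nat) : Int)) = pre := by
  rw [PySem.List.slice_to_natCast]; exact List.take_left

lemma pv_mem_dedupAux {x : String} (m : List String) (pre : List String) :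
    x ∈ pvDedupAux pre m ↔ x ∈ m ∧ x ∉ pre := by
  induction m generalizing pre with
  | nil => simp [pvDedupAux]
  | cons n t ih =>
    by_cases h : n ∈ pre
    · rw [show pvDedupAux pre (n :: t) = pvDedupAux (pre ++ [n]) t by
        simp [pvDedupAux, List.contains_eq_mem, h]]
      rw [ih]
      simp only [List.mem_append, List.mem_singleton, List.mem_cons]
      constructor
      · rintro ⟨h1, h2⟩
        exact ⟨Or.inr h1, fun hx => h2 (Or.inl hx)⟩
      · rintro ⟨h1 | h1, h2⟩
        · exact absurd (h1 ▸ h) h2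
        · refine ⟨h1, ?_⟩
          rintro (hx | hx | hx)
          · exact h2 hx
          · exact h2 (hx ▸ h)
          · simp at hx
    · rw [show pvDedupAux pre (n :: t) = n :: pvDedupAux (pre ++ [n]) t by
        simp [pvDedupAux, List.contains_eq_mem, h]]
      rw [List.mem_cons, ih]
      simp only [List.mem_append, List.mem_singleton, List.mem_cons]
      constructor
      · rintro (h1 | ⟨h1, h2⟩)
        · exact ⟨Or.inl h1, h1 ▸ h⟩
        · exact ⟨Or.inr h1, fun hx => h2 (Or.inl hx)⟩
      · rintro ⟨h1 | h1, h2⟩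
        · exact Or.inl h1
        · by_cases e : x = n
          · exact Or.inl e
          · refine Or.inr ⟨h1, ?_⟩
            rintro (hx | hx | hx)
            · exact h2 hx
            · exact e hx
            · simp at hx

lemma pv_nodup_dedupAux (m pre : List String) : (pvDedupAux pre m).Nodup := by
  induction m generalizing pre with
  | nil => simp [pvDedupAux]
  | cons n t ih =>
    by_cases h : n ∈ pre
    · simpa [pvDedupAux, List.contains_eq_mem, h] using ih (pre ++ [n])
    · have hn : ¬ n ∈ pvDedupAux (pre ++ [n]) t := fun hmem => by
        have := (pv_mem_dedupAux t (pre ++ [n])).1 hmem; simp at this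
      simp [pvDedupAux, List.contains_eq_mem, h, List.nodup_cons, hn, ih (pre ++ [n])]

lemma pv_filter_firsts (m pre : List String) :
    (PySem.List.enumerate m ((pre.length : Nat) : Int)).filter
      (fun p => !((PySem.List.slice (pre ++ m) none (some p.1)).contains p.2))
    = pvFirstPairs pre m := by
  induction m generalizing pre with
  | nil => rfl
  | cons n t ih =>
    rw [PySem.List.enumerate_cons, List.filter_cons]
    have e1 : pre ++ n :: t = (pre ++ [n]) ++ t := by simp
    have e2 : ((pre.length : Nat) : Int) + 1 = (((pre ++ [n]).length : Nat) : Int) := by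
      simp
    have hp : PySem.List.slice (pre ++ n :: t) none (some ((pre.length : Nat) : Int)) = pre :=
      pv_slice_pre
    rw [e1, e2, ih (pre ++ [n])]
    rw [← e1]
    simp only [hp, pvFirstPairs]
    by_cases h : n ∈ pre <;> simp [List.contains_eq_mem, h]

lemma pv_firstPairs_filter_snd (g : String → Bool) (m pre : List String) :
    ((pvFirstPairs pre m).filter (fun p => g p.2)).map (·.2) = (pvDedupAux pre m).filter g := by
  induction m generalizing pre with
  | nil => rfl
  | cons n t ih =>
    by_cases h : n ∈ pre
    · simp [pvFirstPairs, pvDedupAux, List.contains_eq_mem, h, ih]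
    · by_cases hg : g n <;>
        simp [pvFirstPairs, pvDedupAux, List.contains_eq_mem, h, hg, List.filter_cons, ih]

lemma pv_positions_snoc (pre : List String) (a n : String) :
    pvPositions (pre ++ [a]) n
      = pvPositions pre n ++ (if a == n then [((pre.length : Nat) : Int)] else []) := by
  unfold pvPositions
  rw [show PySem.List.enumerate (pre ++ [a]) = PySem.List.enumerate (pre ++ [a]) 0 from rfl,
      PySem.List.enumerate_append, List.filter_append, List.map_append]
  congr 1
  by_cases h : a = n <;>
    simp [PySem.List.enumerate_cons, PySem.List.enumerate, h]

lemma pv_positions_len (m : List String) (n : String) :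
    (pvPositions m n).length = m.count n := by
  unfold pvPositions
  rw [List.length_map]
  have : ∀ (s : Int), ((PySem.List.enumerate m s).filter (fun q => q.2 == n)).length = m.count n := by
    induction m with
    | nil => intro s; rfl
    | cons x t ih =>
      intro s
      rw [PySem.List.enumerate_cons, List.filter_cons, List.count_cons]
      by_cases h : x = n <;> simp [h, ih, beq_iff_eq, add_comm]
  exact this 0

lemma pv_positions_nil {m : List String} {n : String} (h : ¬ n ∈ m) : pvPositions m n = [] := by
  unfold pvPositions
  rw [List.filter_eq_nil_iff.2, List.map_nil]
  intro q hq
  rw [PySem.List.mem_enumerate_iff] at hq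
  obtain ⟨k, hk, rfl⟩ := hq
  simp only [beq_iff_eq]
  exact fun e => h (e ▸ List.getElem_mem hk)

lemma pv_dedupAux_nil_snoc (pre : List String) (a : String) :
    pvDedupAux [] (pre ++ [a]) = pvDedupAux [] pre ++ (if pre.contains a then [] else [a]) := by
  have key : ∀ (l q : List String), pvDedupAux q (l ++ [a])
      = pvDedupAux q l ++ (if (q ++ l).contains a then [] else [a]) := by
    intro l
    induction l with
    | nil => intro q; simp [pvDedupAux]
    | cons x t ih =>
      intro q
      by_cases h : x ∈ q <;>
        simp [pvDedupAux, List.contains_eq_mem, h, ih (q ++ [x]), List.mem_append,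
          List.append_assoc, or_assoc, List.mem_cons]
  simpa using key pre []

-- A's grouping fold produces the first-occurrence items
lemma pv_group_gen (m0 : List String) (m pre : List String)
    (np : PySem.Dict String (List Int))
    (hm : m0 = pre ++ m)
    (hnp : np.items = (pvDedupAux [] pre).map (fun n => (n, pvPositions pre n))) :
    ((PySem.List.enumerate m ((pre.length : Nat) : Int)).foldl
        (fun (np : PySem.Dict String (List Int)) p => np.modify p.2 [] (· ++ [p.1])) np).items
      = (pvDedupAux [] m0).map (fun n => (n, pvPositions m0 n)) := by
  induction m generalizing pre np with
  | nil =>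
    have hpre : m0 = pre := by simpa using hm
    subst hpre
    simpa [PySem.List.enumerate] using hnp
  | cons n t ih =>
    have hkeys : np.keys = pvDedupAux [] pre := by
      simp [PySem.Dict.keys, hnp, List.map_map, Function.comp_def]
    have hnodup : np.keys.Nodup := by rw [hkeys]; exact pv_nodup_dedupAux _ _
    have hcont : np.contains n = true ↔ n ∈ pre := by
      rw [PySem.Dict.contains_iff_mem_keys, hkeys, pv_mem_dedupAux]; simp
    rw [PySem.List.enumerate_cons, List.foldl_cons]
    have hmod : np.modify n [] (· ++ [((pre.length : Nat) : Int)])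
        = np.insert n (np.getD n [] ++ [((pre.length : Nat) : Int)]) := rfl
    have hm' : m0 = (pre ++ [n]) ++ t := by simpa using hm
    have e2 : ((pre.length : Nat) : Int) + 1 = (((pre ++ [n]).length : Nat) : Int) := by simp
    by_cases h : n ∈ pre
    · have hc : np.contains n = true := hcont.2 h
      have hmem : (n, pvPositions pre n) ∈ np.items := by
        rw [hnp]; exact List.mem_map_of_mem ((pv_mem_dedupAux pre []).2 ⟨h, by simp⟩)
      have hget : np.getD n [] = pvPositions pre n :=
        PySem.Dict.getD_of_mem_items np hmem hnodup []
      have hitems : (np.modify n [] (· ++ [((pre.length : Nat) : Int)])).items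
          = (pvDedupAux [] (pre ++ [n])).map (fun x => (x, pvPositions (pre ++ [n]) x)) := by
        rw [hmod, PySem.Dict.items_insert_of_contains _ _ hc, hnp, List.map_map]
        rw [pv_dedupAux_nil_snoc,
          show pre.contains n = true by simpa [List.contains_eq_mem] using h]
        simp only [if_true, List.append_nil]
        refine List.map_congr_left ?_
        intro x hx
        rw [pv_positions_snoc]
        by_cases e : x = n
        · subst e; simp [Function.comp_def, hget]
        · have eb : (n == x) = false := by simpa using fun ee => e ee.symm
          have eb2 : (x == n) = false := by simpa using e
          simp only [Function.comp_def, eb, eb2, if_false, Bool.false_eq_true,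
            Prod.mk.injEq, List.append_nil]
      rw [e2]
      exact ih (pre ++ [n]) _ hm' hitems
    · have hc : np.contains n = false := by
        rw [Bool.eq_false_iff]; intro hcn; exact h (hcont.1 hcn)
      have hget : np.getD n [] = [] := PySem.Dict.getD_of_not_contains np [] hc
      have hitems : (np.modify n [] (· ++ [((pre.length : Nat) : Int)])).items
          = (pvDedupAux [] (pre ++ [n])).map (fun x => (x, pvPositions (pre ++ [n]) x)) := by
        rw [hmod, PySem.Dict.items_insert_of_not_contains _ _ hc, hnp]
        rw [pv_dedupAux_nil_snoc,
          show pre.contains n = false by simpa [List.contains_eq_mem] using h]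
        simp only [if_false, Bool.false_eq_true, List.map_append, List.map_cons, List.map_nil]
        congr 1
        · refine List.map_congr_left ?_
          intro x hx
          have hxpre : x ∈ pre := ((pv_mem_dedupAux pre []).1 hx).1
          have eb : (n == x) = false := by
            simpa using fun ee => h (by rw [ee]; exact hxpre)
          rw [pv_positions_snoc, eb]
          simp
        · rw [pv_positions_snoc, pv_positions_nil h, hget]
          simp
      rw [e2]
      exact ih (pre ++ [n]) _ hm' hitems

-- A's seen-counter fold produces B's prefix-count comprehension
lemma pv_enum_gen (m0 : List String) (m pre : List String)
    (d : PySem.Dict String Int) (acc : List String)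
    (hm : m0 = pre ++ m)
    (hd : ∀ n, d.getD n 0 = (pre.count n : Int)) :
    (m.foldl
        (fun (st : PySem.Dict String Int × List String) name =>
          let seen := st.1.modify name 0 (· + 1)
          (seen, st.2 ++ [if seen.getD name 0 == 1 then name
                          else name ++ "_" ++ PySem.Int.toStr (seen.getD name 0)]))
        (d, acc)).2
      = acc ++ (PySem.List.enumerate m ((pre.length : Nat) : Int)).map (pvEnumName m0) := by
  induction m generalizing pre d acc with
  | nil => simp [PySem.List.enumerate]
  | cons name t ih =>
    rw [List.foldl_cons]
    have hseen : (d.modify name 0 (· + 1)).getD name 0 = (pre.count name : Int) + 1 := by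
      rw [PySem.Dict.getD_modify_self, hd]
    have hm' : m0 = (pre ++ [name]) ++ t := by simpa using hm
    have e2 : ((pre.length : Nat) : Int) + 1 = (((pre ++ [name]).length : Nat) : Int) := by simp
    have hd' : ∀ n, (d.modify name 0 (· + 1)).getD n 0 = (((pre ++ [name]).count n : Nat) : Int) := by
      intro n
      rw [PySem.Dict.getD_modify]
      by_cases e : n = name
      · subst e
        simp [hd, List.count_append]
      · have e' : ¬ name = n := fun ee => e ee.symm
        simp [e, e', hd, List.count_append, List.count_cons]
    have hv : (if (d.modify name 0 (· + 1)).getD name 0 == 1 then name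
               else name ++ "_" ++ PySem.Int.toStr ((d.modify name 0 (· + 1)).getD name 0))
        = pvEnumName m0 (((pre.length : Nat) : Int), name) := by
      rw [hseen]
      unfold pvEnumName
      rw [hm]
      simp only [pv_slice_pre]
      by_cases hz : pre.count name = 0
      · simp [hz]
      · have h1 : (((pre.count name : Nat) : Int) + 1 == 1) = false := by
          simp only [beq_eq_false_iff_ne, ne_eq]
          intro hh
          omega
        have h2 : (pre.count name == 0) = false := by simpa using hz
        simp [h1, h2]
    refine Eq.trans (ih (pre ++ [name]) (d.modify name 0 (· + 1))
        (acc ++ [if (d.modify name 0 (· + 1)).getD name 0 == 1 then name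
                 else name ++ "_" ++ PySem.Int.toStr ((d.modify name 0 (· + 1)).getD name 0)])
        hm' hd') ?_
    rw [← e2, PySem.List.enumerate_cons, List.map_cons, hv]
    simp [List.append_assoc]

-- A's seen-set fold produces the first-occurrence mask
lemma pv_mask_gen (m0 : List String) (m pre : List String)
    (s : PySem.Set String) (acc : List Bool)
    (hm : m0 = pre ++ m)
    (hs : ∀ n, s.contains n = pre.contains n) :
    (m.foldl
        (fun (km : PySem.Set String × List Bool) name =>
          if !(km.1.contains name) then (PySem.Set.add km.1 name, km.2 ++ [true])
          else (km.1, km.2 ++ [false]))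
        (s, acc)).2
      = acc ++ (PySem.List.enumerate m ((pre.length : Nat) : Int)).map
          (fun p => !((PySem.List.slice m0 none (some p.1)).contains p.2)) := by
  induction m generalizing pre s acc with
  | nil => simp [PySem.List.enumerate]
  | cons name t ih =>
    rw [List.foldl_cons]
    have hm' : m0 = (pre ++ [name]) ++ t := by simpa using hm
    have e2 : ((pre.length : Nat) : Int) + 1 = (((pre ++ [name]).length : Nat) : Int) := by simp
    have hp : PySem.List.slice m0 none (some ((pre.length : Nat) : Int)) = pre := by
      rw [hm]; exact pv_slice_pre
    have hmem : ∀ n, (n ∈ s) ↔ n ∈ pre := by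
      intro n
      have := hs n
      simpa [PySem.Set.contains, List.contains_eq_mem, decide_eq_decide] using this
    by_cases h : name ∈ pre
    · have hc : s.contains name = true := by
        simp only [PySem.Set.contains, List.contains_eq_mem, decide_eq_true_eq]
        exact (hmem name).2 h
      have hs' : ∀ n, s.contains n = (pre ++ [name]).contains n := by
        intro n
        simp only [PySem.Set.contains, List.contains_eq_mem, List.mem_append, List.mem_singleton,
          decide_eq_decide, hmem, List.mem_cons]
        constructor
        · exact fun hx => Or.inl hx
        · rintro (hx | hx | hx)
          · exact hx
          · exact hx ▸ h
          · simp at hx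
      simp only [hc, Bool.not_true, Bool.false_eq_true, if_false]
      refine Eq.trans (ih (pre ++ [name]) s (acc ++ [false]) hm' hs') ?_
      rw [← e2, PySem.List.enumerate_cons, List.map_cons]
      simp [hp, List.contains_eq_mem, h, List.append_assoc]
    · have hc : s.contains name = false := by
        simp only [PySem.Set.contains, List.contains_eq_mem, decide_eq_false_iff_not]
        exact fun hx => h ((hmem name).1 hx)
      have hs' : ∀ n, (s.add name).contains n = (pre ++ [name]).contains n := by
        intro n
        have hadd : s.add name = s ++ [name] := by
          simp only [PySem.Set.add, hc, Bool.false_eq_true, if_false]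
        rw [hadd]
        simp only [PySem.Set.contains, List.contains_eq_mem, List.mem_append, List.mem_singleton,
          decide_eq_decide, hmem, List.mem_cons]
      simp only [hc, Bool.not_false, if_true]
      refine Eq.trans (ih (pre ++ [name]) (s.add name) (acc ++ [true]) hm' hs') ?_
      rw [← e2, PySem.List.enumerate_cons, List.map_cons]
      simp [hp, List.contains_eq_mem, h, List.append_assoc]

-- zip-with-mask selection equals index-membership selection
lemma pv_sel {α : Type} (xs : List α) (bs : List Bool) (K : List Int) (s : Int)
    (h : ∀ j : Nat, K.contains (s + (j : Int)) = bs.getD j false) :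
    ((xs.zip bs).filter (·.2)).map (·.1)
      = ((PySem.List.enumerate xs s).filter (fun q => K.contains q.1)).map (·.2) := by
  induction xs generalizing bs s with
  | nil => simp [PySem.List.enumerate]
  | cons x t ih =>
    cases bs with
    | nil =>
      have hK : ∀ (j : Nat), K.contains (s + (j : Int)) = false := fun j => by
        rw [h j]; simp
      simp only [List.zip_nil_right, List.filter_nil, List.map_nil]
      rw [PySem.List.enumerate_cons, List.filter_cons]
      have h0 : K.contains s = false := by simpa using hK 0
      have htail : (PySem.List.enumerate t (s + 1)).filter (fun q => K.contains q.1) = [] := by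
        refine List.filter_eq_nil_iff.2 ?_
        intro q hq
        rw [PySem.List.mem_enumerate_iff] at hq
        obtain ⟨k, hk, rfl⟩ := hq
        simp only [Bool.not_eq_true]
        rw [show s + 1 + (k : Int) = s + ((k + 1 : Nat) : Int) from by push_cast; ring]
        exact hK (k + 1)
      simp only [List.contains_eq_mem] at h0 htail
      simp [h0, htail]
    | cons b bt =>
      rw [List.zip_cons_cons, List.filter_cons, PySem.List.enumerate_cons, List.filter_cons]
      have h0 : K.contains s = b := by simpa using h 0
      have h' : ∀ j : Nat, K.contains (s + 1 + (j : Int)) = bt.getD j false := by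
        intro j
        have hh := h (j + 1)
        rw [show s + ((j + 1 : Nat) : Int) = s + 1 + (j : Int) from by push_cast; ring] at hh
        simpa [List.getD_cons_succ] using hh
      have hrec := ih bt (s + 1) h'
      simp only [List.contains_eq_mem] at h0 hrec
      cases b <;> simp [h0, hrec]

lemma pv_keep_spec (m : List String) (j : Nat) :
    (((PySem.List.enumerate m (0 : Int)).filter
        (fun p => !((PySem.List.slice m none (some p.1)).contains p.2))).map (·.1)).contains
      ((0 : Int) + (j : Int))
    = ((PySem.List.enumerate m (0 : Int)).map
        (fun p => !((PySem.List.slice m none (some p.1)).contains p.2))).getD j false := by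
  rw [Bool.eq_iff_iff]
  simp only [List.contains_eq_mem, List.getD_eq_getElem?_getD, List.getElem?_map,
    PySem.List.getElem?_enumerate, decide_eq_true_eq, List.mem_map, List.mem_filter]
  rcases lt_or_ge j m.length with hj | hj
  · rw [List.getElem?_eq_getElem hj]
    simp only [Option.map_some, Option.getD_some]
    constructor
    · rintro ⟨p, ⟨hp1, hp2⟩, he⟩
      rw [PySem.List.mem_enumerate_iff] at hp1
      obtain ⟨k, hk, rfl⟩ := hp1
      have hkj : k = j := by simp at he; omega
      subst hkj
      exact hp2
    · intro hp
      refine ⟨((0 : Int) + (j : Int), m[j]), ⟨?_, hp⟩, rfl⟩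
      rw [PySem.List.mem_enumerate_iff]
      exact ⟨j, hj, rfl⟩
  · rw [List.getElem?_eq_none (by omega)]
    simp only [Option.map_none, Option.getD_none]
    constructor
    · rintro ⟨p, ⟨hp1, hp2⟩, he⟩
      rw [PySem.List.mem_enumerate_iff] at hp1
      obtain ⟨k, hk, rfl⟩ := hp1
      simp at he
      omega
    · intro hf
      exact absurd hf (by simp)

lemma pv_dup_final (m : List String) :
    (((PySem.List.enumerate m 0).foldl
        (fun (np : PySem.Dict String (List Int)) p => np.modify p.2 [] (· ++ [p.1]))
        PySem.Dict.empty).items).filter (fun p => decide (p.2.length > 1))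
    = (((PySem.List.enumerate m 0).filter
        (fun p => decide (m.count p.2 > 1)
          && !((PySem.List.slice m none (some p.1)).contains p.2))).map (·.2)).map
        (fun n => (n, pvPositions m n)) := by
  have e0 : ((0 : Nat) : Int) = (0 : Int) := by simp
  have h0 := pv_group_gen m m [] PySem.Dict.empty (by simp) rfl
  simp only [List.length_nil, e0] at h0
  rw [h0, List.filter_map]
  rw [← List.filter_filter]
  have h1 := pv_filter_firsts m []
  simp only [List.length_nil, e0, List.nil_append] at h1
  rw [h1, pv_firstPairs_filter_snd (fun n => decide (List.count n m > 1))]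
  congr 1
  refine List.filter_congr ?_
  intro n _
  simp [Function.comp_def, pv_positions_len]

lemma pv_enum_final (m : List String) :
    (m.foldl
        (fun (st : PySem.Dict String Int × List String) name =>
          let seen := st.1.modify name 0 (· + 1)
          (seen, st.2 ++ [if seen.getD name 0 == 1 then name
                          else name ++ "_" ++ PySem.Int.toStr (seen.getD name 0)]))
        (PySem.Dict.empty, [])).2
      = (PySem.List.enumerate m 0).map (pvEnumName m) := by
  have h0 := pv_enum_gen m m [] PySem.Dict.empty []
    (by simp) (fun n => by simp [PySem.Dict.getD_empty])
  simpa using h0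

lemma pv_mask_final (m : List String) :
    (m.foldl
        (fun (km : PySem.Set String × List Bool) name =>
          if !(km.1.contains name) then (PySem.Set.add km.1 name, km.2 ++ [true])
          else (km.1, km.2 ++ [false]))
        (PySem.Set.ofList [], [])).2
      = (PySem.List.enumerate m 0).map
          (fun p => !((PySem.List.slice m none (some p.1)).contains p.2)) := by
  have h0 := pv_mask_gen m m [] (PySem.Set.ofList []) [] (by simp) (fun n => rfl)
  simpa using h0

lemma pv_sel_final {α : Type} (m : List String) (xs : List α) :
    ((xs.zip ((PySem.List.enumerate m 0).map
        (fun p => !((PySem.List.slice m none (some p.1)).contains p.2)))).filter (·.2)).map (·.1)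
    = ((PySem.List.enumerate xs 0).filter
        (fun q => (((PySem.List.enumerate m 0).filter
            (fun p => !((PySem.List.slice m none (some p.1)).contains p.2))).map (·.1)).contains q.1)).map (·.2) := by
  refine pv_sel xs _ _ 0 ?_
  intro j
  exact pv_keep_spec m j

-- ===== VERDICT (by name: the statement is the Claim_ definition above) =====
theorem remap_cla_names_spec : Claim_equal_remap_cla_names := by
  intro data rm oc _ _
  simp only [Spec_remap_cla_names, remap_cla_names, remap_cla_names_alt]
  by_cases h1 : (oc == "enumerate") = true
  · simp only [h1, if_true]
    refine Prod.ext ?_ ?_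
    · rw [pv_enum_final]
    · rw [pv_dup_final]
  · simp only [h1, Bool.false_eq_true, if_false]
    by_cases h2 : (oc == "first-wins") = true
    · simp only [h2, if_true]
      refine Prod.ext ?_ ?_
      · rw [pv_mask_final, pv_sel_final, pv_sel_final, pv_sel_final]
      · rw [pv_dup_final]
    · simp only [h2, Bool.false_eq_true, if_false]
      refine Prod.ext rfl ?_
      rw [pv_dup_final]
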